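-- pv_equiv track=rewrite | github.com/rajkunjadiya441-sketch/task | poki3.py | strongest_teams
-- ===== SOURCE A (Python) =====
-- from itertools import combinations
--
-- def strongest_teams(pokedex,k):
--  strongest=[]
--  max=0
--  for name in combinations(pokedex.keys(),3):
--     typ=set()
--     for pokemon in name:
--       typ.update(pokedex[pokemon])
--     total=len(typ)
--     if total > max:
--       max=total
--       strongest = [(name, typ)]
--     elif max==total:
--       strongest.append((name,typ))
--  return strongest,max
-- ===== SOURCE B (Python) =====
-- def _combos2(names):
--     if not names:
--         return []
--     head, rest = names[0], names[1:]
--     return [(head, b) for b in rest] + _combos2(rest)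
--
--
-- def _combos3(names):
--     if not names:
--         return []
--     head, rest = names[0], names[1:]
--     return [(head, b, c) for (b, c) in _combos2(rest)] + _combos3(rest)
--
--
-- def strongest_teams(pokedex, k):
--     buckets = {}
--     for triple in _combos3(list(pokedex)):
--         types = set()
--         for name in triple:
--             types.update(pokedex[name])
--         buckets.setdefault(len(types), []).append((triple, types))
--     best = max(buckets, default=0)
--     return buckets.get(best, []), best
-- ===== Notes on version B (the rewrite author's own statement) =====
-- stated objective: alternative
-- what changed: A tracks a running max with a reset-or-append candidate list over itertools.combinations; B generates the triples by explicit recursion on the key list, groups every (triple, type-union) into a dict bucketed by union size, and answers with max over the bucket keys (default 0) plus one bucket lookup.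
import Mathlib
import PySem

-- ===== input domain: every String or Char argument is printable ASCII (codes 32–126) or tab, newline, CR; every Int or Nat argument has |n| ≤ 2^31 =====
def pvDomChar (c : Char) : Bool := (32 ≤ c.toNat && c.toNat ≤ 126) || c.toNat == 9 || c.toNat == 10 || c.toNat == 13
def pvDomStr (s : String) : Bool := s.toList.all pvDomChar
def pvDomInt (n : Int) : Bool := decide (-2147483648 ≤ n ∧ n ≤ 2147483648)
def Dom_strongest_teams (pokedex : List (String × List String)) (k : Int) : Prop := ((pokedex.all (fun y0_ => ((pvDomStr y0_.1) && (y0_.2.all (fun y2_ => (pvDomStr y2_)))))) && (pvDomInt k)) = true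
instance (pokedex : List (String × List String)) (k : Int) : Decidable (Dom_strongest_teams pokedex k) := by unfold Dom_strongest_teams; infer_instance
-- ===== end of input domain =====

-- B replaces A's single running-max-with-reset pass over itertools.combinations by a recursive
-- triple generator plus a dict bucketing each (triple, type-union) by union size, answered by
-- max-over-keys (default 0) and one bucket lookup; objective: alternative.

-- ===== PORT A =====
-- A's 3-tuple 'name' (a Python tuple) as a Lean triple
def pvToTriple (c : List String) : String × String × String :=
  match c with
  | [a, b, c] => (a, b, c)
  | _ => ("", "", "")

-- A's inner loop: typ = set(); for pokemon in name: typ.update(pokedex[pokemon])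
def pvTypes (d : PySem.Dict String (List String)) (c : List String) : PySem.Set String :=
  c.foldl (fun s p => PySem.Set.update s (d.getD p [])) PySem.Set.empty

def strongest_teams (pokedex : List (String × List String)) (k : Int) : (List ((String × String × String) × List String)) × Int :=
  let d := PySem.Dict.ofList pokedex
  (PySem.List.combinations d.keys 3).foldl (fun s name =>
    let typ := pvTypes d name
    let total : Int := (typ.length : Int)
    if total > s.2 then ([(pvToTriple name, typ)], total)
    else if s.2 == total then (s.1 ++ [(pvToTriple name, typ)], s.2)
    else s) ([], 0)

-- ===== PORT B =====
-- _combos2: if not names: return []; else pairs with the head plus pairs of the tail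
def pvCombos2 : List String → List (String × String)
  | [] => []
  | h :: rest => rest.map (fun b => (h, b)) ++ pvCombos2 rest

-- _combos3: if not names: return []; else head prepended to each pair of the tail, plus triples of the tail
def pvCombos3 : List String → List (String × String × String)
  | [] => []
  | h :: rest => (pvCombos2 rest).map (fun p => (h, p.1, p.2)) ++ pvCombos3 rest

-- B's inner loop: for name in triple: types.update(pokedex[name])
def pvTypes3 (d : PySem.Dict String (List String)) (t : String × String × String) : PySem.Set String :=
  [t.1, t.2.1, t.2.2].foldl (fun s p => PySem.Set.update s (d.getD p [])) PySem.Set.empty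

def strongest_teams_alt (pokedex : List (String × List String)) (k : Int) : (List ((String × String × String) × List String)) × Int :=
  let d := PySem.Dict.ofList pokedex
  let buckets := (pvCombos3 d.keys).foldl (fun bk t =>
    let typ := pvTypes3 d t
    bk.modify ((typ.length : Int)) [] (fun x => x ++ [(t, typ)])) PySem.Dict.empty
  let best : Int := PySem.List.maxD buckets.keys (fun x => x) 0
  (buckets.getD best [], best)

-- ===== PRECONDITION & SPEC =====
def Spec_strongest_teams (pokedex : List (String × List String)) (k : Int) (out : (List ((String × String × String) × List String)) × Int) : Prop := out = strongest_teams_alt pokedex k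
instance (pokedex : List (String × List String)) (k : Int) (out : (List ((String × String × String) × List String)) × Int) : Decidable (Spec_strongest_teams pokedex k out) := by unfold Spec_strongest_teams; infer_instance

-- ===== CLAIM (what is proved, stated in full; the proofs are below) =====
def Claim_equal_strongest_teams : Prop := ∀ (pokedex : List (String × List String)) (k : Int), Dom_strongest_teams pokedex k → Spec_strongest_teams pokedex k (strongest_teams pokedex k)

-- ===== LEMMAS AND PROOFS =====
abbrev pvP : Type := (String × String × String) × List String

def pvLen (p : pvP) : Int := (p.2.length : Int)

def pvStep (s : List pvP × Int) (p : pvP) : List pvP × Int :=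
  if pvLen p > s.2 then ([p], pvLen p)
  else if s.2 == pvLen p then (s.1 ++ [p], s.2)
  else s

def pvMx (l : List pvP) (m : Int) : Int :=
  l.foldl (fun m p => if pvLen p > m then pvLen p else m) m

theorem pvMx_ge : ∀ (l : List pvP) (m : Int), m ≤ pvMx l m := by
  intro l
  induction l with
  | nil => intro m; simp [pvMx]
  | cons p t ih =>
    intro m
    simp only [pvMx, List.foldl_cons]
    split
    · exact le_trans (by omega) (ih (pvLen p))
    · exact ih m

theorem pvLen_le_pvMx : ∀ (l : List pvP) (m : Int) (p : pvP), p ∈ l → pvLen p ≤ pvMx l m := by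
  intro l
  induction l with
  | nil => intro m p hp; cases hp
  | cons q t ih =>
    intro m p hp
    simp only [pvMx, List.foldl_cons]
    rcases List.mem_cons.mp hp with h | h
    · subst h
      split
      · exact pvMx_ge t (pvLen p)
      · exact le_trans (by omega) (pvMx_ge t m)
    · split
      · exact ih (pvLen q) p h
      · exact ih m p h

theorem pvMx_le : ∀ (l : List pvP) (m b : Int), m ≤ b → (∀ p ∈ l, pvLen p ≤ b) → pvMx l m ≤ b := by
  intro l
  induction l with
  | nil => intro m b hm _; simpa [pvMx] using hm
  | cons q t ih =>
    intro m b hm hb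
    simp only [pvMx, List.foldl_cons]
    split
    · exact ih _ b (hb q (by simp)) (fun p hp => hb p (by simp [hp]))
    · exact ih m b hm (fun p hp => hb p (by simp [hp]))

-- characterization of A's running-max-with-reset loop
theorem pvFold_char : ∀ (l : List pvP) (m : Int) (acc : List pvP),
    l.foldl pvStep (acc, m) =
      (if pvMx l m = m then acc ++ l.filter (fun p => pvLen p == m)
       else l.filter (fun p => pvLen p == pvMx l m), pvMx l m) := by
  intro l
  induction l with
  | nil => intro m acc; simp [pvMx]
  | cons p t ih =>
    intro m acc
    have hge : ∀ m', m' ≤ pvMx t m' := fun m' => pvMx_ge t m'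
    by_cases h1 : pvLen p > m
    · have hstep : pvStep (acc, m) p = ([p], pvLen p) := by
        simp [pvStep, h1]
      have hmx : pvMx (p :: t) m = pvMx t (pvLen p) := by
        simp [pvMx, List.foldl_cons, h1]
      rw [List.foldl_cons, hstep, ih (pvLen p) [p], hmx]
      have hc := hge (pvLen p)
      by_cases h2 : pvMx t (pvLen p) = pvLen p
      · simp [h2, List.filter_cons, show ¬ pvLen p = m by omega]
      · have hne : ¬ (pvLen p == pvMx t (pvLen p)) = true := by
          simp [beq_iff_eq]; omega
        simp [h2, List.filter_cons, hne, if_neg (by omega : ¬ pvMx t (pvLen p) = m)]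
    · have hmx : pvMx (p :: t) m = pvMx t m := by
        simp [pvMx, List.foldl_cons, h1]
      by_cases h2 : m = pvLen p
      · have hstep : pvStep (acc, m) p = (acc ++ [p], m) := by
          simp [pvStep, h1, h2]
        rw [List.foldl_cons, hstep, ih m (acc ++ [p]), hmx]
        have hm := hge m
        by_cases h3 : pvMx t m = m
        · simp [h3, List.filter_cons, beq_iff_eq, ← h2, List.append_assoc]
        · have hne : ¬ (pvLen p == pvMx t m) = true := by
            simp [beq_iff_eq]; omega
          simp [h3, List.filter_cons, hne]
      · have hstep : pvStep (acc, m) p = (acc, m) := by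
          simp [pvStep, h1, beq_iff_eq, h2]
        rw [List.foldl_cons, hstep, ih m acc, hmx]
        have hm := hge m
        by_cases h3 : pvMx t m = m
        · have hne : ¬ (pvLen p == m) = true := by simp [beq_iff_eq]; omega
          simp [h3, List.filter_cons, hne]
        · have hne : ¬ (pvLen p == pvMx t m) = true := by
            simp [beq_iff_eq]; omega
          simp [h3, List.filter_cons, hne]

-- B's pair accessor for a 2-combination
def pvToPair (c : List String) : String × String :=
  match c with
  | [a, b] => (a, b)
  | _ => ("", "")

theorem pvCombos2_eq : ∀ (xs : List String),
    pvCombos2 xs = (PySem.List.combinations xs 2).map pvToPair := by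
  intro xs
  induction xs with
  | nil => simp [pvCombos2, PySem.List.combinations_nil_succ]
  | cons x t ih =>
    rw [show (2 : Nat) = 1 + 1 from rfl, PySem.List.combinations_cons_succ,
        PySem.List.combinations_one]
    simp only [List.map_append, List.map_map, pvCombos2]
    rw [ih]
    rfl

theorem pvCombos3_eq : ∀ (xs : List String),
    pvCombos3 xs = (PySem.List.combinations xs 3).map pvToTriple := by
  intro xs
  induction xs with
  | nil => simp [pvCombos3, PySem.List.combinations_nil_succ]
  | cons x t ih =>
    rw [show (3 : Nat) = 2 + 1 from rfl, PySem.List.combinations_cons_succ]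
    simp only [List.map_append, List.map_map, pvCombos3]
    rw [ih, pvCombos2_eq, List.map_map]
    congr 1
    apply List.map_congr_left
    intro c hc
    have hlen := PySem.List.length_of_mem_combinations hc
    match c, hlen with
    | [a, b], _ => rfl

-- a triple drawn from a 3-combination has the same type union under both inner loops
theorem pvTypes3_toTriple (d : PySem.Dict String (List String)) :
    ∀ (c : List String), c.length = 3 → pvTypes3 d (pvToTriple c) = pvTypes d c := by
  intro c hlen
  match c, hlen with
  | [a, b, c'], _ => rfl

-- ===== VERDICT (by name: the statement is the Claim_ definition above) =====
theorem strongest_teams_spec : Claim_equal_strongest_teams := by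
  intro pokedex k _
  unfold Spec_strongest_teams strongest_teams strongest_teams_alt
  simp only []
  set d := PySem.Dict.ofList pokedex with hd
  -- the materialized (triple, type-union) pairs, in combination order
  set pairs : List pvP :=
    (PySem.List.combinations d.keys 3).map (fun c => (pvToTriple c, pvTypes d c)) with hpairs
  -- A's side: the fold is the running-max fold over pairs
  have hA : (PySem.List.combinations d.keys 3).foldl (fun s name =>
      let typ := pvTypes d name
      let total : Int := (typ.length : Int)
      if total > s.2 then ([(pvToTriple name, typ)], total)
      else if s.2 == total then (s.1 ++ [(pvToTriple name, typ)], s.2)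
      else s) ([], 0) = pairs.foldl pvStep ([], 0) := by
    rw [hpairs, List.foldl_map]
    rfl
  -- B's generator produces exactly the pairs
  have hgen : (pvCombos3 d.keys).map (fun t => (t, pvTypes3 d t)) = pairs := by
    rw [pvCombos3_eq, List.map_map, hpairs]
    apply List.map_congr_left
    intro c hc
    simp only [Function.comp]
    rw [pvTypes3_toTriple d c (PySem.List.length_of_mem_combinations hc)]
  -- B's bucket dict as a fold over keyed pairs
  have hB : (pvCombos3 d.keys).foldl (fun bk t =>
      let typ := pvTypes3 d t
      bk.modify ((typ.length : Int)) [] (fun x => x ++ [(t, typ)])) PySem.Dict.empty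
      = (pairs.map (fun q => (pvLen q, q))).foldl
          (fun bk p => bk.modify p.1 [] (fun x => x ++ [p.2])) PySem.Dict.empty := by
    rw [← hgen, List.map_map, List.foldl_map]
    rfl
  rw [hA, hB, pvFold_char pairs 0 []]
  set L : List (Int × pvP) := pairs.map (fun q => (pvLen q, q)) with hL
  -- bucket lookup = filter
  have hget : ∀ q : Int, (L.foldl (fun bk p => bk.modify p.1 [] (fun x => x ++ [p.2]))
      PySem.Dict.empty).getD q [] = pairs.filter (fun p => pvLen p == q) := by
    intro q
    rw [PySem.Dict.getD_foldl_modify_append, PySem.Dict.getD_empty, hL, List.filter_map,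
        List.map_map]
    simp [Function.comp_def, pvLen]
  -- keys of the bucket dict = the distinct union sizes
  have hkeys : (L.foldl (fun bk p => bk.modify p.1 [] (fun x => x ++ [p.2]))
      PySem.Dict.empty).keys = PySem.Set.ofList (pairs.map pvLen) := by
    rw [PySem.Dict.keys_foldl_modify_key L (fun p => p.1) [] (fun _ p x => x ++ [p.2]),
        PySem.Dict.keys_empty, PySem.Set.update_nil_left, hL, List.map_map]
    rfl
  -- best = pvMx pairs 0
  have hbest : PySem.List.maxD (L.foldl (fun bk p => bk.modify p.1 [] (fun x => x ++ [p.2]))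
      PySem.Dict.empty).keys (fun x => x) 0 = pvMx pairs 0 := by
    rw [hkeys]
    cases hp : pairs with
    | nil =>
      rw [show PySem.Set.ofList (([] : List pvP).map pvLen) = [] from rfl]
      rw [PySem.List.maxD, (PySem.List.max?_eq_none_iff ([] : List Int) (fun x => x)).mpr rfl]
      simp [pvMx]
    | cons p0 t =>
      have hne : PySem.Set.ofList ((p0 :: t).map pvLen) ≠ [] := by
        intro h
        have : pvLen p0 ∈ PySem.Set.ofList ((p0 :: t).map pvLen) := by
          rw [PySem.Set.mem_ofList]; simp
        rw [h] at this; cases this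
      rw [← hp] at *
      rcases hm : PySem.List.max? (PySem.Set.ofList (pairs.map pvLen)) (fun x => x) with _ | m
      · exact absurd ((PySem.List.max?_eq_none_iff _ _).mp hm) (by rw [hp] at *; exact hne)
      · have hmem : m ∈ pairs.map pvLen := by
          have := PySem.List.max?_mem hm
          rwa [PySem.Set.mem_ofList] at this
        rcases List.mem_map.mp hmem with ⟨q, hq, hqm⟩
        have hub : ∀ p ∈ pairs, pvLen p ≤ m := by
          intro p hp'
          have : pvLen p ∈ PySem.Set.ofList (pairs.map pvLen) := by
            rw [PySem.Set.mem_ofList]; exact List.mem_map_of_mem hp'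
          exact PySem.List.max?_isMax hm _ this
        have h0m : (0 : Int) ≤ m := by
          rw [← hqm]; exact Int.natCast_nonneg _
        have h1 : pvMx pairs 0 ≤ m := pvMx_le pairs 0 m h0m hub
        have h2 : m ≤ pvMx pairs 0 := hqm ▸ pvLen_le_pvMx pairs 0 q hq
        simp [PySem.List.maxD, hm]
        omega
  rw [hbest, hget (pvMx pairs 0)]
  by_cases h : pvMx pairs 0 = 0
  · simp [h]
  · simp [h]
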